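-- pv_equiv track=rewrite | github.com/mudassirfayaz/AdventOfCode_2024 | Day14/part2.py | detect_christmas_tree
-- ===== SOURCE A (Python) =====
-- def detect_christmas_tree(grid, n, m):
--     # Define the Christmas tree pattern
--     tree_pattern = [
--         "   #   ",
--         "  ###  ",
--         " ##### ",
--         "#######",
--         "   #   "
--     ]
--     tree_height = len(tree_pattern)
--     tree_width = len(tree_pattern[0])
--
--     for i in range(n - tree_height + 1):
--         for j in range(m - tree_width + 1):
--             match = True
--             for ti in range(tree_height):
--                 for tj in range(tree_width):
--                     if tree_pattern[ti][tj] == '#' and grid[i + ti][j + tj] != '#':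
--                         match = False
--                         break
--                 if not match:
--                     break
--             if match:
--                 return True
--     return False
-- ===== SOURCE B (Python) =====
-- def detect_christmas_tree(grid, n, m):
--     # Bit-parallel search: each grid row becomes an integer bitmask of its '#'
--     # cells; a pattern row matches at every shift j simultaneously via ANDs of
--     # shifted row masks, and the five per-row match masks are intersected.
--     tree_pattern = [
--         "   #   ",
--         "  ###  ",
--         " ##### ",
--         "#######",
--         "   #   "
--     ]
--     if n < 5 or m < 7:
--         return False
--     cols = [[k for k, ch in enumerate(prow) if ch == '#'] for prow in tree_pattern]
--     rowbits = []
--     for r in range(n):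
--         bits = 0
--         for c in range(m):
--             if grid[r][c] == '#':
--                 bits |= 1 << c
--         rowbits.append(bits)
--     window = (1 << (m - 6)) - 1  # bit j set <=> j is a valid left column
--     for i in range(n - 4):
--         acc = window
--         for p in range(5):
--             res = acc
--             for k in cols[p]:
--                 res &= rowbits[i + p] >> k
--             acc = res
--             if not acc:
--                 break
--         if acc:
--             return True
--     return False
-- ===== Notes on version B (the rewrite author's own statement) =====
-- stated objective: alternative
-- what changed: Replaces A's per-window four-nested-loop cell check by a bit-parallel algorithm: each grid row is packed once into an integer bitmask, each pattern row is matched at all shifts j simultaneously by AND-ing shifted row masks, and the five per-row match masks are intersected per top row i.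
import Mathlib
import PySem

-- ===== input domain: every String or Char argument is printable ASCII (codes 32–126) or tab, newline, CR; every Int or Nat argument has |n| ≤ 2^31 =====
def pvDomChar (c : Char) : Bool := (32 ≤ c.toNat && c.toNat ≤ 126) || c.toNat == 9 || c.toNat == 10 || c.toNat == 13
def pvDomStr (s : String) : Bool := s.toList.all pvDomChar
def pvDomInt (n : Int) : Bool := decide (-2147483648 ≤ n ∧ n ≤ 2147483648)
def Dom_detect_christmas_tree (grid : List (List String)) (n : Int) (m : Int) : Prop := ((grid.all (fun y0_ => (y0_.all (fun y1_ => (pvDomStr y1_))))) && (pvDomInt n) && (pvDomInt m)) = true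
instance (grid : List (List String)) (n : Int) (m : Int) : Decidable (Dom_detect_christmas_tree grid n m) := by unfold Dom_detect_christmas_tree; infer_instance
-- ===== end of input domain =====

-- B replaces A's per-window nested cell scan by a bit-parallel algorithm: each grid
-- row is packed once into an integer bitmask, a pattern row is matched at all shifts
-- at once by AND-ing shifted row masks, and the five per-row match masks intersect.

-- ===== PORT A =====
-- the tree pattern; tree_height = 5 = its length, tree_width = 7 = length of its first row
def pvTreePatternA : List String :=
  ["   #   ", "  ###  ", " ##### ", "#######", "   #   "]

-- tree_pattern[ti][tj]; always in range in A (ti < 5, tj < 7); default is unreachable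
def pvPatCharA (ti tj : Int) : Char :=
  match PySem.List.pyGet? pvTreePatternA ti with
  | some s => (PySem.Str.pyGet? s tj).getD ' '
  | none => ' '

-- grid[r][c]; Python raises IndexError out of range (excluded by Pre_); defaults unreachable inside Pre_
def pvCellA (grid : List (List String)) (r c : Int) : String :=
  PySem.List.pyGetD (PySem.List.pyGetD grid r []) c ""

-- the ti/tj loops with the match flag and breaks: short-circuit conjunction over the window
def pvMatchA (grid : List (List String)) (i j : Int) : Bool :=
  (PySem.List.pyRange 0 5 1).all fun ti =>
    (PySem.List.pyRange 0 7 1).all fun tj =>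
      !(pvPatCharA ti tj == '#' && !(pvCellA grid (i + ti) (j + tj) == "#"))

def detect_christmas_tree (grid : List (List String)) (n : Int) (m : Int) : Bool :=
  (PySem.List.pyRange 0 (n - 5 + 1) 1).any fun i =>
    (PySem.List.pyRange 0 (m - 7 + 1) 1).any fun j =>
      pvMatchA grid i j

-- ===== PORT B =====
def pvTreePatternB : List String :=
  ["   #   ", "  ###  ", " ##### ", "#######", "   #   "]

-- cols = [[k for k, ch in enumerate(prow) if ch == '#'] for prow in tree_pattern]
def pvColsB : List (List Nat) :=
  pvTreePatternB.map (fun prow =>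
    prow.toList.zipIdx.filterMap (fun q => if q.1 = '#' then some q.2 else none))

-- bits = 0; for c in range(m): if grid[r][c] == '#': bits |= 1 << c
def pvRowBitsB (row : List String) (mN : Nat) : Nat :=
  (List.range mN).foldl
    (fun (bits : Nat) (c : Nat) => if PySem.List.pyGetD row (c : Int) "" = "#" then bits ||| (1 <<< c) else bits) 0

-- rowbits = [pack(grid[r]) for r in range(n)]
def pvRowBitsListB (grid : List (List String)) (n : Int) (mN : Nat) : List Nat :=
  (PySem.List.pyRange 0 n 1).map (fun r => pvRowBitsB (PySem.List.pyGetD grid r []) mN)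

-- res = acc; for k in ks: res &= bits >> k
def pvResB (acc bits : Nat) (ks : List Nat) : Nat :=
  ks.foldl (fun res k => res &&& (bits >>> k)) acc

-- acc = window; for p in range(5): acc = res-loop; if not acc: break
def pvAccB (rowbits : List Nat) (window : Nat) (i : Int) : Nat :=
  (List.range 5).foldl
    (fun (acc : Nat) (p : Nat) =>
      if acc = 0 then acc
      else pvResB acc (PySem.List.pyGetD rowbits (i + (p : Int)) 0) (pvColsB.getD p [])) window

def detect_christmas_tree_alt (grid : List (List String)) (n : Int) (m : Int) : Bool :=
  if n < 5 ∨ m < 7 then false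
  else
    (PySem.List.pyRange 0 (n - 4) 1).any fun i =>
      pvAccB (pvRowBitsListB grid n m.toNat) ((1 <<< (m.toNat - 6)) - 1) i != 0

-- ===== PRECONDITION & SPEC =====
-- Pre_ excludes inputs whose claimed dimensions n, m overstate the grid's rows / row
-- lengths over the scanned window: there B's packing pass raises IndexError (and A
-- raises too for some grid contents, returning False for others only because a
-- mismatch stops its scan before the out-of-range cell).
def Pre_detect_christmas_tree (grid : List (List String)) (n : Int) (m : Int) : Prop :=
  (5 ≤ n ∧ 7 ≤ m) →
    (n ≤ (grid.length : Int) ∧ ∀ row ∈ grid.take n.toNat, m ≤ (row.length : Int))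
instance (grid : List (List String)) (n : Int) (m : Int) : Decidable (Pre_detect_christmas_tree grid n m) := by unfold Pre_detect_christmas_tree; infer_instance

def pvWitness_detect_christmas_tree : List (List String) × Int × Int :=
  ([["#","#","#","#","#","#","#"],
    ["#","#","#","#","#","#","#"],
    ["#","#","#","#","#","#","#"],
    ["#","#","#","#","#","#","#"],
    ["#","#","#","#","#","#","#"]], 5, 7)

def Spec_detect_christmas_tree (grid : List (List String)) (n : Int) (m : Int) (out : Bool) : Prop := out = detect_christmas_tree_alt grid n m
instance (grid : List (List String)) (n : Int) (m : Int) (out : Bool) : Decidable (Spec_detect_christmas_tree grid n m out) := by unfold Spec_detect_christmas_tree; infer_instance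

-- ===== CLAIM (what is proved, stated in full; the proofs are below) =====
def Claim_equal_detect_christmas_tree : Prop := ∀ (grid : List (List String)) (n : Int) (m : Int), Dom_detect_christmas_tree grid n m → Pre_detect_christmas_tree grid n m → Spec_detect_christmas_tree grid n m (detect_christmas_tree grid n m)

-- ===== LEMMAS AND PROOFS =====

-- the 17 '#' cells of the pattern, as Int and as Nat pairs (proof-side only)
def pvOffsets : List (Int × Int) :=
  [(0,3),(1,2),(1,3),(1,4),(2,1),(2,2),(2,3),(2,4),(2,5),
   (3,0),(3,1),(3,2),(3,3),(3,4),(3,5),(3,6),(4,3)]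
def pvOffN : List (Nat × Nat) :=
  [(0,3),(1,2),(1,3),(1,4),(2,1),(2,2),(2,3),(2,4),(2,5),
   (3,0),(3,1),(3,2),(3,3),(3,4),(3,5),(3,6),(4,3)]

def pvMatchPt (grid : List (List String)) (i j : Int) : Bool :=
  pvOffsets.all fun d => pvCellA grid (i + d.1) (j + d.2) == "#"

lemma pvMatchA_eq_pt (grid : List (List String)) (i j : Int) :
    pvMatchA grid i j = pvMatchPt grid i j := by
  have h5 : PySem.List.pyRange 0 5 1 = [0, 1, 2, 3, 4] := by decide
  have h7 : PySem.List.pyRange 0 7 1 = [0, 1, 2, 3, 4, 5, 6] := by decide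
  have hp00 : (pvPatCharA 0 0 == '#') = false := by decide
  have hp01 : (pvPatCharA 0 1 == '#') = false := by decide
  have hp02 : (pvPatCharA 0 2 == '#') = false := by decide
  have hp03 : (pvPatCharA 0 3 == '#') = true := by decide
  have hp04 : (pvPatCharA 0 4 == '#') = false := by decide
  have hp05 : (pvPatCharA 0 5 == '#') = false := by decide
  have hp06 : (pvPatCharA 0 6 == '#') = false := by decide
  have hp10 : (pvPatCharA 1 0 == '#') = false := by decide
  have hp11 : (pvPatCharA 1 1 == '#') = false := by decide
  have hp12 : (pvPatCharA 1 2 == '#') = true := by decide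
  have hp13 : (pvPatCharA 1 3 == '#') = true := by decide
  have hp14 : (pvPatCharA 1 4 == '#') = true := by decide
  have hp15 : (pvPatCharA 1 5 == '#') = false := by decide
  have hp16 : (pvPatCharA 1 6 == '#') = false := by decide
  have hp20 : (pvPatCharA 2 0 == '#') = false := by decide
  have hp21 : (pvPatCharA 2 1 == '#') = true := by decide
  have hp22 : (pvPatCharA 2 2 == '#') = true := by decide
  have hp23 : (pvPatCharA 2 3 == '#') = true := by decide
  have hp24 : (pvPatCharA 2 4 == '#') = true := by decide
  have hp25 : (pvPatCharA 2 5 == '#') = true := by decide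
  have hp26 : (pvPatCharA 2 6 == '#') = false := by decide
  have hp30 : (pvPatCharA 3 0 == '#') = true := by decide
  have hp31 : (pvPatCharA 3 1 == '#') = true := by decide
  have hp32 : (pvPatCharA 3 2 == '#') = true := by decide
  have hp33 : (pvPatCharA 3 3 == '#') = true := by decide
  have hp34 : (pvPatCharA 3 4 == '#') = true := by decide
  have hp35 : (pvPatCharA 3 5 == '#') = true := by decide
  have hp36 : (pvPatCharA 3 6 == '#') = true := by decide
  have hp40 : (pvPatCharA 4 0 == '#') = false := by decide
  have hp41 : (pvPatCharA 4 1 == '#') = false := by decide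
  have hp42 : (pvPatCharA 4 2 == '#') = false := by decide
  have hp43 : (pvPatCharA 4 3 == '#') = true := by decide
  have hp44 : (pvPatCharA 4 4 == '#') = false := by decide
  have hp45 : (pvPatCharA 4 5 == '#') = false := by decide
  have hp46 : (pvPatCharA 4 6 == '#') = false := by decide
  simp only [pvMatchA, pvMatchPt, pvOffsets, h5, h7, List.all_cons, List.all_nil,
    hp00, hp01, hp02, hp03, hp04, hp05, hp06, hp10, hp11, hp12, hp13, hp14, hp15, hp16, hp20, hp21, hp22, hp23, hp24, hp25, hp26, hp30, hp31, hp32, hp33, hp34, hp35, hp36, hp40, hp41, hp42, hp43, hp44, hp45, hp46,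
    Bool.false_and, Bool.not_false, Bool.true_and, Bool.not_not, Bool.and_true, Bool.and_assoc, add_zero]

lemma pvResB_zero (bits : Nat) (ks : List Nat) : pvResB 0 bits ks = 0 := by
  induction ks with
  | nil => rfl
  | cons k ks ih => simpa [pvResB, Nat.zero_and] using ih

lemma pvResB_testBit (ks : List Nat) (acc bits t : Nat) :
    (pvResB acc bits ks).testBit t = (acc.testBit t && ks.all fun k => bits.testBit (k + t)) := by
  induction ks generalizing acc with
  | nil => simp [pvResB]
  | cons k ks ih =>
    show (pvResB (acc &&& (bits >>> k)) bits ks).testBit t = _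
    rw [ih, Nat.testBit_land, Nat.testBit_shiftRight]
    simp [List.all_cons, Bool.and_assoc]

lemma pvRowBits_testBit (row : List String) (mN t : Nat) :
    (pvRowBitsB row mN).testBit t
      = (decide (t < mN) && decide (PySem.List.pyGetD row (t : Int) "" = "#")) := by
  induction mN with
  | zero => simp [pvRowBitsB, Nat.zero_testBit]
  | succ mN ih =>
    rw [pvRowBitsB, List.range_succ, List.foldl_append, List.foldl_cons, List.foldl_nil]
    rw [show (List.range mN).foldl (fun (bits : Nat) (c : Nat) => if PySem.List.pyGetD row (c : Int) "" = "#" then bits ||| (1 <<< c) else bits) 0 = pvRowBitsB row mN from rfl]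
    by_cases hc : PySem.List.pyGetD row (mN : Int) "" = "#"
    · rw [if_pos hc, Nat.testBit_lor, ih, Nat.one_shiftLeft, Nat.testBit_two_pow]
      by_cases ht : t = mN
      · subst ht; simp only [PySem.List.pyGetD_natCast] at hc
        simp [← List.getD_eq_getElem?_getD, hc]
      · have h1 : (decide (mN = t)) = false := by simp [Ne.symm ht]
        have h2 : (decide (t < mN)) = (decide (t < mN + 1)) := by
          simp only [decide_eq_decide]; omega
        rw [h1, h2, Bool.or_false]
    · rw [if_neg hc, ih]
      by_cases ht : t = mN
      · subst ht; simp only [PySem.List.pyGetD_natCast] at hc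
        simp [← List.getD_eq_getElem?_getD, hc]
      · have h2 : (decide (t < mN)) = (decide (t < mN + 1)) := by
          simp only [decide_eq_decide]; omega
        rw [h2]

lemma pvAcc_testBit (rb : List Nat) (w : Nat) (i : Int) (t : Nat) :
    (pvAccB rb w i).testBit t
      = (w.testBit t &&
         pvOffN.all fun d => (PySem.List.pyGetD rb (i + (d.1 : Int)) 0).testBit (d.2 + t)) := by
  have hcols : pvColsB = [[3],[2,3,4],[1,2,3,4,5],[0,1,2,3,4,5,6],[3]] := by decide
  have hstep : ∀ (acc bits : Nat) (ks : List Nat),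
      (if acc = 0 then acc else pvResB acc bits ks) = pvResB acc bits ks := by
    intro acc bits ks
    by_cases h : acc = 0
    · rw [if_pos h, h, pvResB_zero]
    · rw [if_neg h]
  rw [pvAccB, show List.range 5 = [0,1,2,3,4] from rfl]
  simp only [List.foldl_cons, List.foldl_nil, hstep, hcols]
  simp only [pvResB_testBit]
  simp [pvOffN, List.all_cons, List.all_nil, Bool.and_assoc]

lemma pvAcc_iff (grid : List (List String)) (n m i : Int)
    (h7 : 7 ≤ m) (hi0 : 0 ≤ i) (hin : i < n - 4) :
    (pvAccB (pvRowBitsListB grid n m.toNat) ((1 <<< (m.toNat - 6)) - 1) i ≠ 0)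
      ↔ ∃ j : Int, (0 ≤ j ∧ j < m - 6) ∧ pvMatchPt grid i j = true := by
  have hbound : ∀ e ∈ pvOffN, e.1 ≤ 4 ∧ e.2 ≤ 6 := by decide
  have hoff : pvOffsets = pvOffN.map (fun e => ((e.1 : Int), (e.2 : Int))) := by decide
  have key : ∀ e ∈ pvOffN, ∀ t : Nat, t < m.toNat - 6 →
      ((PySem.List.pyGetD (pvRowBitsListB grid n m.toNat) (i + (e.1 : Int)) 0).testBit (e.2 + t)
        = (pvCellA grid (i + (e.1 : Int)) ((t : Int) + (e.2 : Int)) == "#")) := by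
    intro e he t ht
    obtain ⟨h1, h2⟩ := hbound e he
    rw [pvRowBitsListB, PySem.List.pyGetD_map_pyRange_of_nonneg _ _ _ _ (by omega) (by omega)]
    rw [pvRowBits_testBit]
    have hlt : e.2 + t < m.toNat := by omega
    have hidx : (((e.2 + t : Nat) : Int)) = (t : Int) + (e.2 : Int) := by push_cast; ring
    rw [hidx]
    rw [Bool.eq_iff_iff]
    simp [pvCellA, hlt]
  constructor
  · intro h
    obtain ⟨t, ht⟩ := Nat.exists_testBit_of_ne_zero h
    rw [pvAcc_testBit, Nat.one_shiftLeft, Nat.testBit_two_pow_sub_one, Bool.and_eq_true,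
      decide_eq_true_eq] at ht
    obtain ⟨htw, hall⟩ := ht
    refine ⟨(t : Int), ⟨by omega, by omega⟩, ?_⟩
    rw [pvMatchPt, List.all_eq_true]
    intro d hd
    rw [hoff] at hd
    obtain ⟨e, he, rfl⟩ := List.mem_map.mp hd
    have hc := (List.all_eq_true.mp hall) e he
    rw [key e he t htw] at hc
    exact hc
  · rintro ⟨j, ⟨hj0, hjm⟩, hm⟩
    have hjj : ((j.toNat : Int)) = j := Int.toNat_of_nonneg hj0
    have ht : (pvAccB (pvRowBitsListB grid n m.toNat) ((1 <<< (m.toNat - 6)) - 1) i).testBit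
        j.toNat = true := by
      rw [pvAcc_testBit, Nat.one_shiftLeft, Nat.testBit_two_pow_sub_one]
      rw [Bool.and_eq_true]
      refine ⟨decide_eq_true (by omega), ?_⟩
      rw [List.all_eq_true]
      intro e he
      rw [key e he j.toNat (by omega), hjj]
      exact (List.all_eq_true.mp hm) ((e.1 : Int), (e.2 : Int))
        (by rw [hoff]; exact List.mem_map_of_mem he)
    intro h0
    rw [h0, Nat.zero_testBit] at ht
    exact Bool.false_ne_true ht

-- ===== VERDICT (by name: the statement is the Claim_ definition above) =====
theorem detect_christmas_tree_spec : Claim_equal_detect_christmas_tree := by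
  intro grid n m _ _
  unfold Spec_detect_christmas_tree detect_christmas_tree detect_christmas_tree_alt
  by_cases hsm : n < 5 ∨ m < 7
  · rw [if_pos hsm]
    rcases hsm with h | h
    · rw [PySem.List.pyRange_one_eq_nil (by omega : n - 5 + 1 ≤ 0)]; rfl
    · have hnil : PySem.List.pyRange 0 (m - 7 + 1) 1 = [] :=
        PySem.List.pyRange_one_eq_nil (by omega)
      simp [hnil]
  · rw [if_neg hsm]
    have h7 : 7 ≤ m := by omega
    have h1 : n - 5 + 1 = n - 4 := by ring
    have h2 : m - 7 + 1 = m - 6 := by ring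
    rw [h1, h2]
    rw [Bool.eq_iff_iff]
    simp only [List.any_eq_true, PySem.List.mem_pyRange_one]
    constructor
    · rintro ⟨i, ⟨hi0, hin⟩, j, ⟨hj0, hjm⟩, hm⟩
      refine ⟨i, ⟨hi0, hin⟩, ?_⟩
      rw [bne_iff_ne]
      exact (pvAcc_iff grid n m i h7 hi0 hin).mpr
        ⟨j, ⟨hj0, hjm⟩, by rw [← pvMatchA_eq_pt]; exact hm⟩
    · rintro ⟨i, ⟨hi0, hin⟩, hne⟩
      rw [bne_iff_ne] at hne
      obtain ⟨j, ⟨hj0, hjm⟩, hm⟩ := (pvAcc_iff grid n m i h7 hi0 hin).mp hne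
      exact ⟨i, ⟨hi0, hin⟩, j, ⟨hj0, hjm⟩, by rw [pvMatchA_eq_pt]; exact hm⟩
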